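-- pv_equiv track=rewrite | github.com/denis-sukhoverkhov/kb | python/algorithms/make_palindromic.py | make_palindromic
-- ===== SOURCE A (Python) =====
-- def is_palindrom(A):
--     ln = len(A)
--     i = 0
--     while i < ln / 2:
--         if A[i] != A[ln - 1 - i]:
--             return 0
--         i += 1
--
--     return 1
--
-- def make_palindromic(A):
--
--     ct = 0
--     flag = False
--
--     while len(A):
--
--         if is_palindrom(A):
--             flag = True
--             break
--         else:
--             ct += 1
--             A = A[:-1]
--
--     if flag:
--         return ct
--
--     return 0
-- ===== SOURCE B (Python) =====
-- def make_palindromic(A):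
--     # KMP prefix function on T = A + [None] + reversed(A): the longest border of T
--     # is the longest palindromic prefix of A; answer = n - that length.
--     n = len(A)
--     T = A + [None] + A[::-1]
--     m = len(T)
--     pi = [0]
--     k = 0
--     for i in range(1, m):
--         while k and T[i] != T[k]:
--             k = pi[k - 1]
--         if T[i] == T[k]:
--             k += 1
--         pi.append(k)
--     return n - pi[m - 1]
-- ===== Notes on version B (the rewrite author's own statement) =====
-- stated objective: alternative
-- what changed: B computes the longest palindromic prefix in one linear pass as the last value of the KMP prefix function of A + [None] + reversed(A) and returns n minus that length, instead of A's loop that repeatedly truncates the list and rescans it with a two-pointer palindrome check.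
import Mathlib
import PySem

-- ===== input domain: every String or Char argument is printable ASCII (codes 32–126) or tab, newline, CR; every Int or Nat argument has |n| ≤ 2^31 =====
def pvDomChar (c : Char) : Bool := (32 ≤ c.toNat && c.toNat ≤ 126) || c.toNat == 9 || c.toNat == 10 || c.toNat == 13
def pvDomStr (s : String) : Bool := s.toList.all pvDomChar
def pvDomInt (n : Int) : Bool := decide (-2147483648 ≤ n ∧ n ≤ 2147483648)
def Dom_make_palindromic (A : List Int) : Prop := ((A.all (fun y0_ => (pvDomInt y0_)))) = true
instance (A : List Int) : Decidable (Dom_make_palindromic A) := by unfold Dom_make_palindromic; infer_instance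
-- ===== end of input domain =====

-- B replaces A's delete-and-rescan search by the KMP prefix function on A + [None] + reversed(A):
-- its last entry is the longest palindromic prefix length L, and the answer is n - L.
-- Objective: alternative algorithm (linear-time mechanism instead of repeated palindrome scans).

-- ===== PORT A =====
-- while i < ln/2: Python's true-division comparison 'i < ln / 2' on ints i, ln ≥ 0 is exactly 2*i < ln.
-- Indices i and ln-1-i are always in range (ln = A.length), so pyGetD's default is never used (exact here).
def is_palindrom_loop (A : List Int) (ln i : Nat) : Int :=
  if 2 * i < ln then
    if PySem.List.pyGetD A (i : Int) 0 ≠ PySem.List.pyGetD A ((ln : Int) - 1 - (i : Int)) 0 then 0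
    else is_palindrom_loop A ln (i + 1)
  else 1
termination_by ln - i

def is_palindrom (A : List Int) : Int := is_palindrom_loop A A.length 0

def mp_loop (A : List Int) (ct : Int) : Int :=
  if A.length ≠ 0 then
    if is_palindrom A ≠ 0 then ct          -- flag = True; break; return ct
    else mp_loop (PySem.List.slice A none (some (-1))) (ct + 1)   -- ct += 1; A = A[:-1]
  else 0                                    -- loop exits with flag = False; return 0
termination_by A.length
decreasing_by
  simp only [PySem.List.slice_to_neg_one, List.length_dropLast]
  omega

def make_palindromic (A : List Int) : Int := mp_loop A 0

-- ===== PORT B =====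
-- Source B's inner 'while k and T[i] != T[k]: k = pi[k-1]'.  All indices used are provably in
-- range on every call the port makes, so List.getD is exact here.  The fuel argument (called
-- with fuel = k) only makes the loop total: k strictly decreases on the real run, so fuel = k
-- is never exhausted (proved in the lemmas below).
def kmpShrink (T : List (Option Int)) (pi : List Nat) (ti : Option Int) : Nat → Nat → Nat
  | 0, k => k
  | fuel + 1, k =>
      if k ≠ 0 ∧ ti ≠ T.getD k none then kmpShrink T pi ti fuel (pi.getD (k - 1) 0)
      else k

-- Source B's 'for i in range(1, m)' loop; pi grows by one entry per iteration (pi.append(k)).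
def kmpLoop (T : List (Option Int)) (m i : Nat) (pi : List Nat) (k : Nat) : List Nat :=
  if i < m then
    let k' := kmpShrink T pi (T.getD i none) k k
    let k'' := if T.getD i none = T.getD k' none then k' + 1 else k'
    kmpLoop T m (i + 1) (pi ++ [k'']) k''
  else pi
termination_by m - i

def make_palindromic_alt (A : List Int) : Int :=
  let T : List (Option Int) := A.map some ++ [none] ++ (A.reverse.map some)   -- A + [None] + A[::-1]
  let m := T.length
  let pi := kmpLoop T m 1 [0] 0
  (A.length : Int) - (pi.getD (m - 1) 0 : Int)

-- ===== PRECONDITION & SPEC =====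
def Spec_make_palindromic (A : List Int) (out : Int) : Prop := out = make_palindromic_alt A
instance (A : List Int) (out : Int) : Decidable (Spec_make_palindromic A out) := by unfold Spec_make_palindromic; infer_instance

-- ===== CLAIM (what is proved, stated in full; the proofs are below) =====
def Claim_equal_make_palindromic : Prop := ∀ (A : List Int), Dom_make_palindromic A → Spec_make_palindromic A (make_palindromic A)

-- ===== LEMMAS AND PROOFS =====

-- `bordP T j k`: the prefix of length k of `T.take j` is also a (proper) suffix of it.
abbrev bordP (T : List (Option Int)) (j k : Nat) : Prop :=
  k < j ∧ (T.take j).drop (j - k) = T.take k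

-- longest proper border of `T.take j`
def maxBord (T : List (Option Int)) (j : Nat) : Nat := Nat.findGreatest (bordP T j) j

-- longest palindromic prefix of A (specification-level, A-side)
def lpp (P : List Int) : Nat :=
  if P.reverse = P then P.length else lpp P.dropLast
termination_by P.length
decreasing_by
  rename_i h
  have : P ≠ [] := by rintro rfl; exact h rfl
  have : P.length ≠ 0 := fun h0 => this (List.length_eq_zero_iff.mp h0)
  simp only [List.length_dropLast]; omega

-- Common specification from the previous A-side proof: deletions until palindromic.
def delCount (P : List Int) : Int :=
  if P = [] then 0
  else if P.reverse = P then 0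
  else 1 + delCount P.dropLast
termination_by P.length
decreasing_by
  rename_i h _
  have : P.length ≠ 0 := fun h0 => h (List.length_eq_zero_iff.mp h0)
  simp only [List.length_dropLast]
  omega

-- ---------- A-side lemmas (A computes delCount) ----------

lemma pal_cond_iff (A : List Int) (ln i : Nat) (hi : i < ln) :
    (PySem.List.pyGetD A (i : Int) 0 ≠ PySem.List.pyGetD A ((ln : Int) - 1 - (i : Int)) 0)
      ↔ A.getD i 0 ≠ A.getD (ln - 1 - i) 0 := by
  have hc : ((ln : Int) - 1 - (i : Int)) = ((ln - 1 - i : Nat) : Int) := by omega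
  rw [hc, PySem.List.pyGetD_natCast, PySem.List.pyGetD_natCast]

lemma is_palindrom_loop_mem (A : List Int) (ln : Nat) :
    ∀ k i, ln - i ≤ k → is_palindrom_loop A ln i = 0 ∨ is_palindrom_loop A ln i = 1 := by
  intro k
  induction k with
  | zero =>
      intro i hi
      rw [is_palindrom_loop, if_neg (by omega)]
      right; rfl
  | succ k ih =>
      intro i hi
      rw [is_palindrom_loop]
      by_cases h2 : 2 * i < ln
      · rw [if_pos h2]
        by_cases hne : PySem.List.pyGetD A (i : Int) 0 ≠ PySem.List.pyGetD A ((ln : Int) - 1 - (i : Int)) 0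
        · rw [if_pos hne]; left; rfl
        · rw [if_neg hne]; exact ih (i + 1) (by omega)
      · rw [if_neg h2]; right; rfl

lemma is_palindrom_loop_iff (A : List Int) (ln : Nat) :
    ∀ k i, ln - i ≤ k →
      (is_palindrom_loop A ln i = 1 ↔
        ∀ j, i ≤ j → 2 * j < ln → A.getD j 0 = A.getD (ln - 1 - j) 0) := by
  intro k
  induction k with
  | zero =>
      intro i hi
      rw [is_palindrom_loop, if_neg (by omega)]
      constructor
      · intro _ j hij hj; omega
      · intro _; rfl
  | succ k ih =>
      intro i hi
      rw [is_palindrom_loop]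
      by_cases h2 : 2 * i < ln
      · rw [if_pos h2]
        by_cases hne : PySem.List.pyGetD A (i : Int) 0 ≠ PySem.List.pyGetD A ((ln : Int) - 1 - (i : Int)) 0
        · rw [if_pos hne]
          constructor
          · intro h; exact absurd h (by decide)
          · intro h
            exact absurd ((pal_cond_iff A ln i (by omega)).mp hne) (by
              simp only [not_not]; exact h i le_rfl h2)
        · rw [if_neg hne]
          rw [ih (i + 1) (by omega)]
          have heq : A.getD i 0 = A.getD (ln - 1 - i) 0 := by
            by_contra hx
            exact hne ((pal_cond_iff A ln i (by omega)).mpr hx)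
          constructor
          · intro h j hij hj
            rcases Nat.eq_or_lt_of_le hij with rfl | hlt
            · exact heq
            · exact h j hlt hj
          · intro h j hij hj; exact h j (by omega) hj
      · rw [if_neg h2]
        constructor
        · intro _ j hij hj; omega
        · intro _; rfl

lemma pal_key (A : List Int)
    (h : ∀ j, 2 * j < A.length → A.getD j 0 = A.getD (A.length - 1 - j) 0) :
    ∀ a, a < A.length → A[A.length - 1 - a]? = A[a]? := by
  have base : ∀ a, a < A.length → 2 * a < A.length → A[A.length - 1 - a]? = A[a]? := by
    intro a ha hc
    have hv := h a hc
    rw [List.getD_eq_getElem A 0 ha, List.getD_eq_getElem A 0 (show A.length - 1 - a < A.length by omega)] at hv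
    rw [List.getElem?_eq_getElem ha, List.getElem?_eq_getElem (show A.length - 1 - a < A.length by omega)]
    exact congrArg some hv.symm
  intro a ha
  by_cases hc : 2 * a < A.length
  · exact base a ha hc
  · have hc2 : 2 * (A.length - 1 - a) < A.length := by omega
    have := base (A.length - 1 - a) (by omega) hc2
    rw [show A.length - 1 - (A.length - 1 - a) = a by omega] at this
    exact this.symm

lemma reverse_eq_iff (A : List Int) :
    A.reverse = A ↔ ∀ j, 2 * j < A.length → A.getD j 0 = A.getD (A.length - 1 - j) 0 := by
  constructor
  · intro h j hj
    rw [List.getD_eq_getElem?_getD, List.getD_eq_getElem?_getD]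
    suffices hs : A[j]? = A[A.length - 1 - j]? by rw [hs]
    have e : A.reverse[A.length - 1 - j]? = A[A.length - 1 - j]? := by rw [h]
    rw [List.getElem?_reverse (show A.length - 1 - j < A.length by omega)] at e
    rw [show A.length - 1 - (A.length - 1 - j) = j by omega] at e
    exact e
  · intro h
    apply List.ext_getElem?
    intro i
    by_cases hi : i < A.length
    · rw [List.getElem?_reverse (by simpa using hi)]
      exact pal_key A h i hi
    · rw [List.getElem?_eq_none (by simp; omega), List.getElem?_eq_none (by omega)]

lemma is_palindrom_ne_zero_iff (A : List Int) : is_palindrom A ≠ 0 ↔ A.reverse = A := by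
  unfold is_palindrom
  rcases is_palindrom_loop_mem A A.length A.length 0 (by omega) with h | h
  · rw [h]
    constructor
    · intro h0; exact absurd rfl h0
    · intro hpal
      have h1 := (is_palindrom_loop_iff A A.length A.length 0 (by omega)).mpr
        (fun j _ hj => (reverse_eq_iff A).mp hpal j hj)
      rw [h] at h1
      exact absurd h1 (by decide)
  · rw [h]
    constructor
    · intro _
      exact (reverse_eq_iff A).mpr
        (fun j hj => (is_palindrom_loop_iff A A.length A.length 0 (by omega)).mp h j (Nat.zero_le j) hj)
    · intro _; decide

lemma two_le_of_reverse_ne (L : List Int) (h : L ≠ []) (hr : L.reverse ≠ L) : 2 ≤ L.length := by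
  match L with
  | [] => exact absurd rfl h
  | [a] => exact absurd rfl hr
  | a :: b :: t => simp

lemma mp_loop_eq :
    ∀ k (P : List Int) (ct : Int), P.length ≤ k → P ≠ [] → mp_loop P ct = ct + delCount P := by
  intro k
  induction k with
  | zero =>
      intro P ct hk h
      exact absurd (List.length_eq_zero_iff.mp (by omega)) h
  | succ k ih =>
      intro P ct hk h
      have hl : P.length ≠ 0 := fun h0 => h (List.length_eq_zero_iff.mp h0)
      rw [mp_loop, if_pos hl]
      by_cases hp : is_palindrom P ≠ 0
      · rw [if_pos hp, delCount, if_neg h, if_pos ((is_palindrom_ne_zero_iff P).mp hp)]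
        ring
      · rw [if_neg hp]
        have hr : P.reverse ≠ P := fun hx => hp ((is_palindrom_ne_zero_iff P).mpr hx)
        have h2 : 2 ≤ P.length := two_le_of_reverse_ne P h hr
        have hdl : P.dropLast ≠ [] := by
          intro hx
          have := List.length_dropLast (xs := P)
          rw [hx] at this
          simp at this
          omega
        rw [PySem.List.slice_to_neg_one,
            ih P.dropLast (ct + 1) (by simp only [List.length_dropLast]; omega) hdl]
        conv_rhs => rw [delCount, if_neg h, if_neg hr]
        ring

-- ---------- lpp: basic facts ----------

lemma lpp_ne_nil_len (P : List Int) (h : P.reverse ≠ P) : 1 ≤ P.length := by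
  rcases P with _ | ⟨a, t⟩
  · exact absurd rfl h
  · simp

lemma lpp_le : ∀ n (P : List Int), P.length ≤ n → lpp P ≤ P.length := by
  intro n
  induction n with
  | zero =>
      intro P hP
      have : P = [] := List.length_eq_zero_iff.mp (by omega)
      subst this
      simp [lpp]
  | succ n ih =>
      intro P hP
      rw [lpp]
      by_cases h : P.reverse = P
      · rw [if_pos h]
      · rw [if_neg h]
        have h1 := lpp_ne_nil_len P h
        have := ih P.dropLast (by simp [List.length_dropLast]; omega)
        simp only [List.length_dropLast] at this
        omega

lemma take_dropLast_comm (P : List Int) (b : Nat) (hb : b ≤ P.length - 1) :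
    P.take b = P.dropLast.take b := by
  rw [List.dropLast_eq_take, List.take_take]
  congr 1
  omega

lemma lpp_pal : ∀ n (P : List Int), P.length ≤ n →
    (P.take (lpp P)).reverse = P.take (lpp P) := by
  intro n
  induction n with
  | zero =>
      intro P hP
      have : P = [] := List.length_eq_zero_iff.mp (by omega)
      subst this
      simp [lpp]
  | succ n ih =>
      intro P hP
      rw [lpp]
      by_cases h : P.reverse = P
      · rw [if_pos h, List.take_length]
        exact h
      · rw [if_neg h]
        have h1 := lpp_ne_nil_len P h
        have hle : lpp P.dropLast ≤ P.dropLast.length := lpp_le _ _ le_rfl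
        simp only [List.length_dropLast] at hle
        rw [take_dropLast_comm P _ hle]
        exact ih P.dropLast (by simp [List.length_dropLast]; omega)

lemma lpp_max : ∀ n (P : List Int), P.length ≤ n →
    ∀ b, b ≤ P.length → (P.take b).reverse = P.take b → b ≤ lpp P := by
  intro n
  induction n with
  | zero =>
      intro P hP b hb _
      have : P = [] := List.length_eq_zero_iff.mp (by omega)
      subst this
      simp at hb
      simp [hb, lpp]
  | succ n ih =>
      intro P hP b hb hpal
      rw [lpp]
      by_cases h : P.reverse = P
      · rw [if_pos h]; exact hb
      · rw [if_neg h]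
        have h1 := lpp_ne_nil_len P h
        have hbne : b ≠ P.length := by
          rintro rfl
          rw [List.take_length] at hpal
          exact h hpal
        have hb' : b ≤ P.length - 1 := by omega
        rw [take_dropLast_comm P b hb'] at hpal
        exact ih P.dropLast (by simp [List.length_dropLast]; omega) b
          (by simp [List.length_dropLast]; omega) hpal

lemma delCount_eq_lpp : ∀ n (P : List Int), P.length ≤ n →
    delCount P = (P.length : Int) - (lpp P : Int) := by
  intro n
  induction n with
  | zero =>
      intro P hP
      have : P = [] := List.length_eq_zero_iff.mp (by omega)
      subst this
      rw [delCount]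
      simp [lpp]
  | succ n ih =>
      intro P hP
      by_cases h0 : P = []
      · subst h0
        rw [delCount]
        simp [lpp]
      · rw [delCount, if_neg h0]
        by_cases h : P.reverse = P
        · rw [if_pos h, lpp, if_pos h]
          ring
        · rw [if_neg h, lpp, if_neg h]
          have h1 := lpp_ne_nil_len P h
          have h2 : lpp P.dropLast ≤ P.dropLast.length := lpp_le _ _ le_rfl
          rw [ih P.dropLast (by simp [List.length_dropLast]; omega)]
          simp only [List.length_dropLast] at h2 ⊢
          have : (((P.length - 1 : Nat)) : Int) = (P.length : Int) - 1 := by omega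
          rw [this]
          ring

-- ---------- border theory ----------

lemma bord_zero (T : List (Option Int)) (j : Nat) (h : 1 ≤ j) : bordP T j 0 := by
  refine ⟨h, ?_⟩
  rw [Nat.sub_zero, List.take_zero, List.drop_eq_nil_iff]
  simp [List.length_take]

lemma bord_trans (T : List (Option Int)) (j k k' : Nat)
    (h1 : bordP T j k) (h2 : bordP T k k') : bordP T j k' := by
  obtain ⟨hk, e1⟩ := h1
  obtain ⟨hk', e2⟩ := h2
  refine ⟨lt_trans hk' hk, ?_⟩
  have harith : j - k' = (j - k) + (k - k') := by omega
  rw [harith, ← List.drop_drop, e1, e2]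

lemma bord_step_down (T : List (Option Int)) (j k k' : Nat)
    (h1 : bordP T j k) (h2 : bordP T j k') (hlt : k' < k) : bordP T k k' := by
  obtain ⟨hk, e1⟩ := h1
  obtain ⟨hk', e2⟩ := h2
  refine ⟨hlt, ?_⟩
  rw [← e1, List.drop_drop]
  have harith : (j - k) + (k - k') = j - k' := by omega
  rw [harith, e2]

lemma take_succ_getD (T : List (Option Int)) (i : Nat) (hi : i < T.length) :
    T.take (i + 1) = T.take i ++ [T.getD i none] := by
  rw [List.take_succ, List.getElem?_eq_getElem hi, List.getD_eq_getElem T none hi]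
  rfl

lemma bord_succ_iff (T : List (Option Int)) (i b : Nat)
    (hi : i < T.length) (hb1 : 1 ≤ b) (hbi : b ≤ i) :
    bordP T (i + 1) b ↔ bordP T i (b - 1) ∧ T.getD (b - 1) none = T.getD i none := by
  have hbm : b - 1 < T.length := by omega
  have e1 : T.take (i + 1) = T.take i ++ [T.getD i none] := take_succ_getD T i hi
  have e2 : T.take b = T.take (b - 1) ++ [T.getD (b - 1) none] := by
    have := take_succ_getD T (b - 1) hbm
    rwa [Nat.sub_add_cancel hb1] at this
  have hd : i + 1 - b ≤ (T.take i).length := by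
    rw [List.length_take]; omega
  have e3 : (T.take (i + 1)).drop (i + 1 - b)
      = (T.take i).drop (i - (b - 1)) ++ [T.getD i none] := by
    rw [e1, List.drop_append_of_le_length hd]
    congr 2
    omega
  constructor
  · rintro ⟨-, heq⟩
    rw [e3, e2] at heq
    obtain ⟨hpre, hlast⟩ := List.append_inj' heq (by simp)
    refine ⟨⟨by omega, hpre⟩, ?_⟩
    simpa using hlast.symm
  · rintro ⟨⟨-, hpre⟩, hlast⟩
    refine ⟨by omega, ?_⟩
    rw [e3, e2, hpre, hlast]

-- maxBord basic facts
lemma mb_bord (T : List (Option Int)) (j : Nat) (h : 1 ≤ j) : bordP T j (maxBord T j) :=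
  Nat.findGreatest_spec (Nat.zero_le j) (bord_zero T j h)

lemma mb_lt (T : List (Option Int)) (j : Nat) (h : 1 ≤ j) : maxBord T j < j :=
  (mb_bord T j h).1

lemma le_mb (T : List (Option Int)) (j b : Nat) (hb : bordP T j b) : b ≤ maxBord T j :=
  Nat.le_findGreatest (le_of_lt hb.1) hb

-- ---------- shrink loop correctness ----------

lemma shrink_spec (T : List (Option Int)) (pi : List Nat) (i : Nat) (hi1 : 1 ≤ i)
    (hpi : ∀ j, j < i → pi.getD j 0 = maxBord T (j + 1)) (ti : Option Int) :
    ∀ fuel k, k ≤ fuel → bordP T i k →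
      (∀ b, bordP T i b → T.getD b none = ti → b ≤ k) →
      bordP T i (kmpShrink T pi ti fuel k) ∧
      (kmpShrink T pi ti fuel k = 0 ∨ T.getD (kmpShrink T pi ti fuel k) none = ti) ∧
      (∀ b, bordP T i b → T.getD b none = ti → b ≤ kmpShrink T pi ti fuel k) := by
  intro fuel
  induction fuel with
  | zero =>
      intro k hk hkb hmax
      have : k = 0 := by omega
      subst this
      exact ⟨hkb, Or.inl rfl, hmax⟩
  | succ fuel ih =>
      intro k hk hkb hmax
      rw [kmpShrink]
      by_cases hc : k ≠ 0 ∧ ti ≠ T.getD k none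
      · rw [if_pos hc]
        obtain ⟨hk0, hne⟩ := hc
        have hklt : k < i := hkb.1
        have hkm : k - 1 < i := by omega
        have hpik : pi.getD (k - 1) 0 = maxBord T k := by
          have := hpi (k - 1) hkm
          rwa [Nat.sub_add_cancel (by omega)] at this
        rw [hpik]
        have hbk : bordP T k (maxBord T k) := mb_bord T k (by omega)
        have hlt : maxBord T k < k := mb_lt T k (by omega)
        refine ih (maxBord T k) (by omega) (bord_trans T i k _ hkb hbk) ?_
        intro b hb hbt
        have hble : b ≤ k := hmax b hb hbt
        have hbne : b ≠ k := by
          rintro rfl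
          exact hne hbt.symm
        exact le_mb T k b (bord_step_down T i k b hkb hb (by omega))
      · rw [if_neg hc]
        push_neg at hc
        refine ⟨hkb, ?_, hmax⟩
        by_cases hk0 : k = 0
        · exact Or.inl hk0
        · exact Or.inr (hc hk0).symm

-- one iteration of the main loop computes maxBord (i+1)
lemma step_spec (T : List (Option Int)) (pi : List Nat) (i : Nat)
    (hi1 : 1 ≤ i) (hi : i < T.length)
    (hpi : ∀ j, j < i → pi.getD j 0 = maxBord T (j + 1)) :
    (if T.getD i none = T.getD (kmpShrink T pi (T.getD i none) (maxBord T i) (maxBord T i)) none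
       then kmpShrink T pi (T.getD i none) (maxBord T i) (maxBord T i) + 1
       else kmpShrink T pi (T.getD i none) (maxBord T i) (maxBord T i))
      = maxBord T (i + 1) := by
  obtain ⟨hrb, hr0, hrmax⟩ :=
    shrink_spec T pi i hi1 hpi (T.getD i none) (maxBord T i) (maxBord T i) le_rfl
      (mb_bord T i hi1) (fun b hb _ => le_mb T i b hb)
  set r := kmpShrink T pi (T.getD i none) (maxBord T i) (maxBord T i) with hrdef
  by_cases hm : T.getD i none = T.getD r none
  · rw [if_pos hm]
    have hbr1 : bordP T (i + 1) (r + 1) := by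
      rw [bord_succ_iff T i (r + 1) hi (by omega) (by have := hrb.1; omega)]
      simpa using ⟨hrb, hm.symm⟩
    apply le_antisymm
    · exact le_mb T (i + 1) (r + 1) hbr1
    · have hM : bordP T (i + 1) (maxBord T (i + 1)) := mb_bord T (i + 1) (by omega)
      set M := maxBord T (i + 1) with hMdef
      by_cases hM0 : M = 0
      · omega
      · have hM1 : 1 ≤ M := by omega
        have hMi : M ≤ i := by have := hM.1; omega
        rw [bord_succ_iff T i M hi hM1 hMi] at hM
        have := hrmax (M - 1) hM.1 hM.2
        omega
  · rw [if_neg hm]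
    have hr : r = 0 := by
      rcases hr0 with h | h
      · exact h
      · exact absurd h.symm hm
    rw [hr]
    symm
    rw [show maxBord T (i + 1) = Nat.findGreatest (bordP T (i + 1)) (i + 1) from rfl,
        Nat.findGreatest_eq_zero_iff]
    intro b hb0 hbi1 hbord
    have hb1 : 1 ≤ b := hb0
    have hbi : b ≤ i := by have := hbord.1; omega
    rw [bord_succ_iff T i b hi hb1 hbi] at hbord
    have hble := hrmax (b - 1) hbord.1 hbord.2
    rw [hr] at hble
    have hb1' : b = 1 := by omega
    subst hb1'
    simp only [Nat.sub_self] at hbord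
    rw [hr] at hm
    exact hm hbord.2.symm

-- main loop invariant
lemma loop_spec (T : List (Option Int)) (m : Nat) (hm : m = T.length) :
    ∀ cnt i pi k, m - i ≤ cnt → 1 ≤ i → i ≤ m → pi.length = i →
      (∀ j, j < i → pi.getD j 0 = maxBord T (j + 1)) → k = maxBord T i →
      ∀ j, j < m → (kmpLoop T m i pi k).getD j 0 = maxBord T (j + 1) := by
  intro cnt
  induction cnt with
  | zero =>
      intro i pi k hc h1 hle hlen hpi hk
      rw [kmpLoop, if_neg (by omega)]
      intro j hj
      exact hpi j (by omega)
  | succ cnt ih =>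
      intro i pi k hc h1 hle hlen hpi hk
      by_cases him : i < m
      · rw [kmpLoop, if_pos him]
        have hstep := step_spec T pi i h1 (by omega) hpi
        rw [← hk] at hstep
        have hpi' : ∀ j2, j2 < i + 1 → (pi ++ [maxBord T (i + 1)]).getD j2 0 = maxBord T (j2 + 1) := by
          intro j2 hj2
          by_cases hj2i : j2 < i
          · rw [List.getD_append _ _ _ _ (by omega)]
            exact hpi j2 hj2i
          · have hj2e : j2 = i := by omega
            subst hj2e
            have hgoal : (pi ++ [maxBord T (j2 + 1)]).getD pi.length 0 = maxBord T (j2 + 1) := by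
              rw [List.getD_eq_getElem?_getD, List.getElem?_concat_length]
              rfl
            rwa [hlen] at hgoal
        simp only [hstep]
        exact ih (i + 1) (pi ++ [maxBord T (i + 1)]) (maxBord T (i + 1))
          (by omega) (by omega) (by omega) (by simp [hlen]) hpi' rfl
      · rw [kmpLoop, if_neg him]
        intro j hj
        exact hpi j (by omega)

-- ---------- the glued text T = A + [None] + reversed(A) ----------

lemma TA_length (A : List Int) :
    (A.map some ++ [none] ++ (A.reverse.map some)).length = 2 * A.length + 1 := by
  simp [List.length_append]; omega

-- every position except A.length holds a `some`
lemma TA_ne_none (A : List Int) (idx : Nat)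
    (hidx : idx < 2 * A.length + 1) (hne : idx ≠ A.length) :
    (A.map some ++ [none] ++ (A.reverse.map some))[idx]? ≠ some none := by
  set n := A.length with hn
  by_cases hlt : idx < n
  · rw [List.getElem?_append_left (by simp [List.length_append]; omega),
        List.getElem?_append_left (by simp; omega), List.getElem?_map,
        List.getElem?_eq_getElem (by omega)]
    simp
  · have hgt : n + 1 ≤ idx := by omega
    rw [List.getElem?_append_right (by simp [List.length_append]; omega)]
    have hsub : idx - (A.map some ++ [none]).length < A.reverse.length := by
      simp [List.length_append]; omega
    rw [List.getElem?_map, List.getElem?_eq_getElem hsub]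
    simp

lemma TA_at_sep (A : List Int) :
    (A.map some ++ [none] ++ (A.reverse.map some))[A.length]? = some none := by
  rw [List.getElem?_append_left (by simp [List.length_append]),
      List.getElem?_append_right (by simp)]
  simp

-- borders of T are no longer than n (the separator blocks longer ones)
lemma bord_le_n (A : List Int) (b : Nat)
    (hb : bordP (A.map some ++ [none] ++ (A.reverse.map some)) (2 * A.length + 1) b) :
    b ≤ A.length := by
  set T := A.map some ++ [none] ++ (A.reverse.map some) with hT
  set n := A.length with hn
  set m := 2 * n + 1 with hm
  by_contra hgt
  push_neg at hgt
  obtain ⟨hblt, heq⟩ := hb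
  have hTlen : T.length = m := TA_length A
  rw [show T.take m = T by rw [← hTlen, List.take_length]] at heq
  have h1 : (T.drop (m - b))[n]? = (T.take b)[n]? := by rw [heq]
  rw [List.getElem?_drop] at h1
  rw [List.getElem?_take_of_lt (by omega)] at h1
  have h2 : T[n]? = some none := TA_at_sep A
  rw [h2] at h1
  exact TA_ne_none A (m - b + n) (by omega) (by omega) h1

-- borders of T of length ≤ n are exactly the palindromic prefixes of A
lemma bord_iff_pal (A : List Int) (b : Nat) (hb : b ≤ A.length) :
    bordP (A.map some ++ [none] ++ (A.reverse.map some)) (2 * A.length + 1) b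
      ↔ (A.take b).reverse = A.take b := by
  set T := A.map some ++ [none] ++ (A.reverse.map some) with hT
  set n := A.length with hn
  set m := 2 * n + 1 with hm
  have hTlen : T.length = m := TA_length A
  have htake : T.take m = T := by rw [← hTlen, List.take_length]
  have hdrop : T.drop (m - b) = ((A.take b).reverse).map some := by
    rw [hT, List.drop_append]
    have hlen1 : (A.map some ++ [none]).length = A.length + 1 := by simp
    have h2 : (A.map some ++ [none]).drop (m - b) = [] :=
      List.drop_eq_nil_iff.mpr (by simp; omega)
    have h3 : m - b - (A.map some ++ [none]).length = A.length - b := by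
      rw [hlen1]; omega
    rw [h2, List.nil_append, h3, ← List.map_drop, List.drop_reverse]
    have h4 : A.length - (A.length - b) = b := by omega
    rw [h4]
  have htb : T.take b = (A.take b).map some := by
    rw [hT, List.take_append_of_le_length (by simp [List.length_append]; omega),
        List.take_append_of_le_length (by simp; omega), List.map_take]
  constructor
  · rintro ⟨-, heq⟩
    rw [htake, hdrop, htb] at heq
    exact List.map_injective_iff.mpr (Option.some_injective _) heq
  · intro hpal
    refine ⟨by omega, ?_⟩
    rw [htake, hdrop, htb, hpal]

-- the longest border of T is exactly lpp A
lemma maxBord_eq_lpp (A : List Int) :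
    maxBord (A.map some ++ [none] ++ (A.reverse.map some)) (2 * A.length + 1) = lpp A := by
  set T := A.map some ++ [none] ++ (A.reverse.map some) with hT
  set m := 2 * A.length + 1 with hm
  have hM : bordP T m (maxBord T m) := mb_bord T m (by omega)
  have hMn : maxBord T m ≤ A.length := bord_le_n A _ hM
  apply le_antisymm
  · exact lpp_max A.length A le_rfl _ hMn ((bord_iff_pal A _ hMn).mp hM)
  · exact le_mb T m _ ((bord_iff_pal A (lpp A) (lpp_le A.length A le_rfl)).mpr (lpp_pal A.length A le_rfl))

-- maxBord at j = 1 is 0 (initial state of the loop)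
lemma maxBord_one (T : List (Option Int)) : maxBord T 1 = 0 := by
  rw [show maxBord T 1 = Nat.findGreatest (bordP T 1) 1 from rfl,
      Nat.findGreatest_eq_zero_iff]
  intro b hb0 hb1 hbord
  have := hbord.1
  omega

-- B computes n - lpp A
lemma alt_eq (A : List Int) : make_palindromic_alt A = (A.length : Int) - (lpp A : Int) := by
  unfold make_palindromic_alt
  set T := A.map some ++ [none] ++ (A.reverse.map some) with hT
  have hTlen : T.length = 2 * A.length + 1 := TA_length A
  have hfinal := loop_spec T T.length rfl (T.length - 1) 1 [0] 0
    le_rfl le_rfl (by omega) rfl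
    (by
      intro j hj
      have : j = 0 := by omega
      subst this
      simpa using (maxBord_one T).symm)
    (maxBord_one T).symm
    (T.length - 1) (by omega)
  simp only [hfinal]
  have : T.length - 1 + 1 = T.length := by omega
  rw [this, hTlen, maxBord_eq_lpp A]

-- A computes n - lpp A as well
lemma a_eq (A : List Int) : make_palindromic A = (A.length : Int) - (lpp A : Int) := by
  unfold make_palindromic
  rcases eq_or_ne A [] with rfl | hA
  · rw [mp_loop]
    simp [lpp]
  · rw [mp_loop_eq A.length A 0 le_rfl hA, delCount_eq_lpp A.length A le_rfl]
    ring

-- ===== VERDICT (by name: the statement is the Claim_ definition above) =====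
theorem make_palindromic_spec : Claim_equal_make_palindromic := by
  intro A _
  unfold Spec_make_palindromic
  rw [a_eq, alt_eq]
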